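-- pv_equiv track=rewrite | github.com/UsernameForGerman/PrettlNKKomax | komax_app/modules/HarnessChartProcessing.py | __get_amount_black_white_komax
-- ===== SOURCE A (Python) =====
-- def __get_amount_black_white_komax(komaxes):
--     amount_black_pairing_komax = 0
--     amount_white_pairing_komax = 0
--
--     amount_black_komax = 0
--     amount_white_komax = 0
--
--     for key, item in komaxes.items():
--         if item[0] == 1 and item[1] == 1 and item[2] == 1:
--             amount_white_pairing_komax += 1
--         elif item[0] == 1 and item[1] == 2 and item[2] == 1:
--             amount_black_pairing_komax += 1
--         elif item[0] == 1 and item[1] == 1 and item[2] == 0: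
--             amount_white_komax += 1
--         elif item[0] == 1 and item[1] == 2 and item[2] == 0:
--             amount_black_komax += 1
--
--     return (amount_black_pairing_komax, amount_black_komax, amount_white_pairing_komax, amount_white_komax)
-- ===== SOURCE B (Python) =====
-- def __get_amount_black_white_komax(komaxes):
--     triples = [tuple(item[:3]) for item in komaxes.values()]
--     return (triples.count((1, 2, 1)), triples.count((1, 2, 0)),
--             triples.count((1, 1, 1)), triples.count((1, 1, 0)))
-- ===== Notes on version B (the rewrite author's own statement) =====
-- stated objective: simpler
-- what changed: Replaced the single accumulating loop with its if/elif cascade and four scalar counters by a staged computation: first map every value to its first-three-elements tuple, then obtain each of the four results with a separate list.count pass; no branching logic remains.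
import Mathlib
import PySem

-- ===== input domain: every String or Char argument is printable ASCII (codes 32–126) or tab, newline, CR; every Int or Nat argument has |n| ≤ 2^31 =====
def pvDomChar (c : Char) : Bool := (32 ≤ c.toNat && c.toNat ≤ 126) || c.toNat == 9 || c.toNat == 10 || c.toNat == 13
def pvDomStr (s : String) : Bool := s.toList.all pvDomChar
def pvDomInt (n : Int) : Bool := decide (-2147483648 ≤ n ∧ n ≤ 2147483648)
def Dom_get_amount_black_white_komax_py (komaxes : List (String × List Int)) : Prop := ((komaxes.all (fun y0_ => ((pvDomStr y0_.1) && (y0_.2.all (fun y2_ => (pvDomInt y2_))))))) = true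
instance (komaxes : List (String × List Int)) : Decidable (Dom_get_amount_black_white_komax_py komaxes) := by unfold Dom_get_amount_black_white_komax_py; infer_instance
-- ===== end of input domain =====

-- B replaces the accumulating if/elif loop by staged passes: map each value to its
-- first-three-elements tuple, then four list.count lookups (objective: simpler).


-- ===== PORT A =====
-- state = (amount_black_pairing, amount_black, amount_white_pairing, amount_white), in return order
def get_amount_black_white_komax_py (komaxes : List (String × List Int)) : Int × Int × Int × Int :=
  komaxes.foldl (fun s kv =>
    let item := kv.2
    let g0 := PySem.List.pyGetD item 0 0      -- item[0]; default unused inside Pre_ (in-range there)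
    let g1 := PySem.List.pyGetD item 1 0
    let g2 := PySem.List.pyGetD item 2 0
    if g0 = 1 ∧ g1 = 1 ∧ g2 = 1 then (s.1, s.2.1, s.2.2.1 + 1, s.2.2.2)
    else if g0 = 1 ∧ g1 = 2 ∧ g2 = 1 then (s.1 + 1, s.2.1, s.2.2.1, s.2.2.2)
    else if g0 = 1 ∧ g1 = 1 ∧ g2 = 0 then (s.1, s.2.1, s.2.2.1, s.2.2.2 + 1)
    else if g0 = 1 ∧ g1 = 2 ∧ g2 = 0 then (s.1, s.2.1 + 1, s.2.2.1, s.2.2.2)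
    else s) (0, 0, 0, 0)

-- ===== PORT B =====
def get_amount_black_white_komax_py_alt (komaxes : List (String × List Int)) : Int × Int × Int × Int :=
  let triples := komaxes.map (fun kv => PySem.List.slice kv.2 none (some 3))   -- tuple(item[:3])
  ((PySem.List.count triples [1, 2, 1] : Int), (PySem.List.count triples [1, 2, 0] : Int),
   (PySem.List.count triples [1, 1, 1] : Int), (PySem.List.count triples [1, 1, 0] : Int))

-- ===== PRECONDITION & SPEC =====
-- Pre_ excludes exactly the inputs where some value list is too short for A's chain of index
-- accesses (Python raises IndexError there; B slices and returns instead).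
def Pre_get_amount_black_white_komax_py (komaxes : List (String × List Int)) : Prop :=
  ∀ p ∈ komaxes, 1 ≤ p.2.length ∧
    (p.2.getD 0 0 = 1 → 2 ≤ p.2.length ∧ ((p.2.getD 1 0 = 1 ∨ p.2.getD 1 0 = 2) → 3 ≤ p.2.length))
instance (komaxes : List (String × List Int)) : Decidable (Pre_get_amount_black_white_komax_py komaxes) := by unfold Pre_get_amount_black_white_komax_py; infer_instance

def pvWitness_get_amount_black_white_komax_py : (List (String × List Int)) :=
  [("a", [1, 1, 1]), ("b", [1, 2, 0]), ("c", [2])]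

def Spec_get_amount_black_white_komax_py (komaxes : List (String × List Int)) (out : Int × Int × Int × Int) : Prop := out = get_amount_black_white_komax_py_alt komaxes
instance (komaxes : List (String × List Int)) (out : Int × Int × Int × Int) : Decidable (Spec_get_amount_black_white_komax_py komaxes out) := by unfold Spec_get_amount_black_white_komax_py; infer_instance

-- ===== CLAIM (what is proved, stated in full; the proofs are below) =====
def Claim_equal_get_amount_black_white_komax_py : Prop := ∀ (komaxes : List (String × List Int)), Dom_get_amount_black_white_komax_py komaxes → Pre_get_amount_black_white_komax_py komaxes → Spec_get_amount_black_white_komax_py komaxes (get_amount_black_white_komax_py komaxes)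

-- ===== LEMMAS AND PROOFS =====

-- the safety condition Pre_ imposes on one value list
def pvSafe (item : List Int) : Prop :=
  1 ≤ item.length ∧
    (item.getD 0 0 = 1 → 2 ≤ item.length ∧ ((item.getD 1 0 = 1 ∨ item.getD 1 0 = 2) → 3 ≤ item.length))

-- one step of A, on a safe item, adds the indicator of item.take 3 hitting each of the four keys
lemma pvStep_eq (item : List Int) (h : pvSafe item) (s : Int × Int × Int × Int) :
    (let g0 := PySem.List.pyGetD item 0 0
     let g1 := PySem.List.pyGetD item 1 0
     let g2 := PySem.List.pyGetD item 2 0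
     if g0 = 1 ∧ g1 = 1 ∧ g2 = 1 then (s.1, s.2.1, s.2.2.1 + 1, s.2.2.2)
     else if g0 = 1 ∧ g1 = 2 ∧ g2 = 1 then (s.1 + 1, s.2.1, s.2.2.1, s.2.2.2)
     else if g0 = 1 ∧ g1 = 1 ∧ g2 = 0 then (s.1, s.2.1, s.2.2.1, s.2.2.2 + 1)
     else if g0 = 1 ∧ g1 = 2 ∧ g2 = 0 then (s.1, s.2.1 + 1, s.2.2.1, s.2.2.2)
     else s) =
    (s.1 + (if item.take 3 = [1, 2, 1] then 1 else 0),
     s.2.1 + (if item.take 3 = [1, 2, 0] then 1 else 0),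
     s.2.2.1 + (if item.take 3 = [1, 1, 1] then 1 else 0),
     s.2.2.2 + (if item.take 3 = [1, 1, 0] then 1 else 0)) := by
  obtain ⟨h1, h2⟩ := h
  match item with
  | [] => simp at h1
  | [a] =>
    have ha : a ≠ 1 := fun e => absurd (h2 (by simp [e])).1 (by simp)
    simp [PySem.List.pyGetD, ha]
  | [a, b] =>
    have h' : a = 1 → b ≠ 1 ∧ b ≠ 2 := by
      intro e
      have h3 := (h2 (by simp [e])).2
      exact ⟨fun e' => by have := h3 (Or.inl (by simp [e'])); simp at this,
             fun e' => by have := h3 (Or.inr (by simp [e'])); simp at this⟩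
    by_cases ea : a = 1
    · obtain ⟨eb1, eb2⟩ := h' ea
      simp [PySem.List.pyGetD, ea, eb1, eb2]
    · simp [PySem.List.pyGetD, ea]
  | a :: b :: c :: t =>
    have hg0 : PySem.List.pyGetD (a :: b :: c :: t) 0 0 = a := by simp [PySem.List.pyGetD_ofNat']
    have hg1 : PySem.List.pyGetD (a :: b :: c :: t) 1 0 = b := by simp [PySem.List.pyGetD_ofNat']
    have hg2 : PySem.List.pyGetD (a :: b :: c :: t) 2 0 = c := by simp [PySem.List.pyGetD_ofNat']
    have ht : (a :: b :: c :: t).take 3 = [a, b, c] := rfl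
    simp only [hg0, hg1, hg2, ht, List.cons.injEq, and_true]
    split_ifs <;> simp_all

-- A's fold, started at any state, adds the counts of the four keys among the truncated items
lemma pvFold_eq (xs : List (String × List Int)) (s : Int × Int × Int × Int)
    (h : ∀ p ∈ xs, pvSafe p.2) :
    xs.foldl (fun s kv =>
      let item := kv.2
      let g0 := PySem.List.pyGetD item 0 0
      let g1 := PySem.List.pyGetD item 1 0
      let g2 := PySem.List.pyGetD item 2 0
      if g0 = 1 ∧ g1 = 1 ∧ g2 = 1 then (s.1, s.2.1, s.2.2.1 + 1, s.2.2.2)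
      else if g0 = 1 ∧ g1 = 2 ∧ g2 = 1 then (s.1 + 1, s.2.1, s.2.2.1, s.2.2.2)
      else if g0 = 1 ∧ g1 = 1 ∧ g2 = 0 then (s.1, s.2.1, s.2.2.1, s.2.2.2 + 1)
      else if g0 = 1 ∧ g1 = 2 ∧ g2 = 0 then (s.1, s.2.1 + 1, s.2.2.1, s.2.2.2)
      else s) s =
    (s.1 + ((xs.map (fun kv => kv.2.take 3)).count [1, 2, 1] : Int),
     s.2.1 + ((xs.map (fun kv => kv.2.take 3)).count [1, 2, 0] : Int),
     s.2.2.1 + ((xs.map (fun kv => kv.2.take 3)).count [1, 1, 1] : Int),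
     s.2.2.2 + ((xs.map (fun kv => kv.2.take 3)).count [1, 1, 0] : Int)) := by
  induction xs generalizing s with
  | nil => simp
  | cons p rest ih =>
    have hp := h p (by simp)
    have hr : ∀ q ∈ rest, pvSafe q.2 := fun q hq => h q (by simp [hq])
    simp only [List.foldl_cons]
    rw [pvStep_eq p.2 hp s, ih _ hr]
    simp only [List.map_cons, List.count_cons]
    refine Prod.ext ?_ (Prod.ext ?_ (Prod.ext ?_ ?_)) <;> simp <;> split_ifs <;> ring

-- ===== VERDICT (by name: the statement is the Claim_ definition above) =====
theorem get_amount_black_white_komax_py_spec : Claim_equal_get_amount_black_white_komax_py := by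
  intro komaxes _ hpre
  unfold Spec_get_amount_black_white_komax_py
  unfold get_amount_black_white_komax_py get_amount_black_white_komax_py_alt
  have hslice : ∀ (x : List Int), PySem.List.slice x none (some 3) = x.take 3 := by
    intro x
    have h := PySem.List.slice_to (xs := x) (b := 3) (by norm_num)
    simpa using h
  rw [pvFold_eq komaxes (0, 0, 0, 0) hpre]
  simp only [hslice, PySem.List.count_eq]
  simp
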